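-- pv_equiv track=rewrite | github.com/pypi-data/pypi-mirror-88 | packages/bruco/bruco-0.1.4-py3-none-any.whl/bruco/functions.py | newline_name
-- ===== SOURCE A (Python) =====
-- def newline_name(s):
--     if len(s) > 10:
--         N = int(len(s)/10)
--         idx = []
--         for i in range(N):
--             try:
--                 idx.append(s.index('_', 10*(i+1)))
--             except:
--                 pass
--         if len(idx) !=0:
--             newstr = ''
--             for i in range(len(idx)):
--                 if i == 0:
--                     newstr = s[0:idx[0]]
--                 else:
--                     newstr = newstr + "<br>" + s[idx[i-1]:idx[i]]
--             newstr = newstr + '<br>' + s[idx[-1]:]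
--             return newstr
--         else:
--             return s
--     else:
--         return s
-- ===== SOURCE B (Python) =====
-- def newline_name(s):
--     n = len(s)
--     if n <= 10:
--         return s
--     # one pass: all underscore positions, in increasing order
--     unds = [j for j, c in enumerate(s) if c == '_']
--     # two pointers: for each start 10, 20, ..., the first underscore at or after it
--     cuts = []
--     k = 0
--     for start in range(10, 10 * (n // 10) + 1, 10):
--         while k < len(unds) and unds[k] < start:
--             k += 1
--         if k == len(unds):
--             break
--         cuts.append(unds[k])
--     if not cuts:
--         return s
--     parts = [s[:cuts[0]]] + [s[a:b] for a, b in zip(cuts, cuts[1:] + [n])]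
--     return '<br>'.join(parts)
-- ===== Notes on version B (the rewrite author's own statement) =====
-- stated objective: faster
-- what changed: A calls str.index once per 10-character block, each call rescanning from the block start, and rebuilds the string by repeated concatenation; B collects all underscore positions in one pass, sweeps them with a two-pointer walk over the multiples of ten, and assembles the result with a single join.
import Mathlib
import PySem

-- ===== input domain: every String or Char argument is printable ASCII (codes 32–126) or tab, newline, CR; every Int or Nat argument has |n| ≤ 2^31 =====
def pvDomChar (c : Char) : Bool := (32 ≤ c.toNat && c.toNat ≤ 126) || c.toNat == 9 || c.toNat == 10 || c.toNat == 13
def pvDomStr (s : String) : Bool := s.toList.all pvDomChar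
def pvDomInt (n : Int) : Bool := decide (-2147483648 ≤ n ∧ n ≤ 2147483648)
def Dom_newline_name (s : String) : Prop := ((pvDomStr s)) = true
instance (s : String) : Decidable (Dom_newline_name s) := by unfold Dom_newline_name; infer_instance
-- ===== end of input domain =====

-- B replaces A's repeated s.index scans by one pass collecting the underscore positions
-- and a two-pointer sweep over the 10-multiples, joining the pieces once.

-- ===== PORT A =====
-- literal transliteration of A; strings handled as List Char; s.index('_', start) inside
-- try/except ported as PySem.Chars.findFrom with its -1 (= ValueError) check;
-- int(len(s)/10) = len(s) // 10 (len(s) is a nonnegative int of machine size)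
def newline_name (s : String) : String :=
  let cs := s.toList
  if cs.length > 10 then
    let N : Nat := cs.length / 10
    let idx : List Int := (List.range N).foldl (fun (acc : List Int) (i : Nat) =>
      let r := PySem.Chars.findFrom cs ['_'] (10*((i : Int)+1)) none
      if r = -1 then acc else acc ++ [r]) []
    if idx.length ≠ 0 then
      let newstr : List Char := (List.range idx.length).foldl (fun ns i =>
        if i = 0 then PySem.List.slice cs (some 0) (some (idx.getD 0 0))
        else ns ++ "<br>".toList ++ PySem.List.slice cs (some (idx.getD (i-1) 0)) (some (idx.getD i 0))) []
      String.ofList (newstr ++ "<br>".toList ++ PySem.List.slice cs (some (PySem.List.pyGetD idx (-1) 0)) none)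
    else s
  else s

-- ===== PORT B =====
-- B-side helper: Source B's loop 'for start in …: while k < len(unds) and unds[k] < start: k += 1; …',
-- with the pointer k represented as the not-yet-passed suffix of unds
def pvTwoPtrB : List Int → List Int → List Int
  | [], _ => []
  | st :: rest, unds =>
    match unds.dropWhile (fun u => u < st) with
    | [] => []
    | u :: _ => u :: pvTwoPtrB rest (unds.dropWhile (fun u => u < st))

-- literal transliteration of YOUR implementation B (Source B)
def newline_name_alt (s : String) : String :=
  let cs := s.toList
  let n := cs.length
  if n ≤ 10 then s
  else
    let unds : List Int := (PySem.List.enumerate cs 0).filterMap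
      (fun p => if p.2 = '_' then some p.1 else none)
    let cuts : List Int := pvTwoPtrB (PySem.List.pyRange 10 (10*((n/10 : Nat) : Int)+1) 10) unds
    match cuts with
    | [] => s
    | c0 :: _ =>
      let parts := PySem.List.slice cs none (some c0) ::
        (cuts.zip (cuts.tail ++ [(n : Int)])).map (fun p => PySem.List.slice cs (some p.1) (some p.2))
      String.ofList (PySem.Chars.join "<br>".toList parts)

-- ===== PRECONDITION & SPEC =====
def Spec_newline_name (s : String) (out : String) : Prop := out = newline_name_alt s
instance (s : String) (out : String) : Decidable (Spec_newline_name s out) := by unfold Spec_newline_name; infer_instance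

-- ===== CLAIM (what is proved, stated in full; the proofs are below) =====
def Claim_equal_newline_name : Prop := ∀ (s : String), Dom_newline_name s → Spec_newline_name s (newline_name s)

-- ===== LEMMAS AND PROOFS =====


def pvPos : List Char → List Nat
  | [] => []
  | c :: l => if c = '_' then 0 :: (pvPos l).map (· + 1) else (pvPos l).map (· + 1)

theorem pvUnds_eq (cs : List Char) (off : Int) :
    (PySem.List.enumerate cs off).filterMap (fun p => if p.2 = '_' then some p.1 else none)
      = (pvPos cs).map (fun j : Nat => off + (j : Int)) := by
  induction cs generalizing off with
  | nil => simp [PySem.List.enumerate_nil, pvPos]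
  | cons c l ih =>
    rw [PySem.List.enumerate_cons, List.filterMap_cons]
    by_cases hc : c = '_'
    · rw [if_pos (by simpa using hc), ih, pvPos, if_pos hc, List.map_cons, List.map_map]
      refine List.cons_eq_cons.mpr ⟨by simp, List.map_congr_left fun j _ => ?_⟩
      simp only [Function.comp_def]; push_cast; ring
    · rw [if_neg (by simpa using hc), ih, pvPos, if_neg hc, List.map_map]
      exact List.map_congr_left fun j _ => by simp only [Function.comp_def]; push_cast; ring

theorem pvPos_nil_iff (cs : List Char) : pvPos cs = [] ↔ '_' ∉ cs := by
  induction cs with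
  | nil => simp [pvPos]
  | cons c l ih =>
    by_cases hc : c = '_'
    · simp [pvPos, hc]
    · simp only [pvPos, if_neg hc, List.map_eq_nil_iff, ih, List.mem_cons, not_or]
      constructor
      · exact fun h => ⟨fun h2 => hc h2.symm, h⟩
      · exact fun h => h.2

theorem pvPos_head (cs : List Char) (j : Nat) (h : (pvPos cs).head? = some j) :
    cs[j]? = some '_' ∧ ∀ i < j, cs[i]? ≠ some '_' := by
  induction cs generalizing j with
  | nil => simp [pvPos] at h
  | cons c l ih =>
    by_cases hc : c = '_'
    · simp [pvPos, hc] at h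
      subst h; simp [hc]
    · simp [pvPos, hc, List.head?_map] at h
      obtain ⟨j', hj', rfl⟩ := h
      obtain ⟨h1, h2⟩ := ih j' hj'
      refine ⟨by simpa using h1, ?_⟩
      intro i hi
      cases i with
      | zero => simpa using hc
      | succ i' => simpa using h2 i' (by omega)

theorem pvPos_drop (cs : List Char) (k : Nat) :
    (pvPos cs).dropWhile (fun j => j < k) = (pvPos (cs.drop k)).map (· + k) := by
  induction k generalizing cs with
  | zero => simp
  | succ k ih =>
    have hmap : ∀ (xs : List Nat),
        (xs.map (· + 1)).dropWhile (fun j => j < k + 1)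
          = (xs.dropWhile (fun j => j < k)).map (· + 1) := by
      intro xs
      rw [List.dropWhile_map,
        show ((fun j : Nat => decide (j < k + 1)) ∘ fun x : Nat => x + 1)
            = (fun j : Nat => decide (j < k)) from
          funext fun x => by simp only [Function.comp_def, decide_eq_decide]; omega]
    cases cs with
    | nil => simp [pvPos]
    | cons c l =>
      by_cases hc : c = '_'
      · rw [show pvPos (c :: l) = 0 :: (pvPos l).map (· + 1) from by simp [pvPos, hc],
          List.dropWhile_cons, if_pos (by simp), hmap, ih, List.drop_succ_cons, List.map_map]
        exact List.map_congr_left fun x _ => by simp only [Function.comp_def]; omega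
      · rw [show pvPos (c :: l) = (pvPos l).map (· + 1) from by simp [pvPos, hc],
          hmap, ih, List.drop_succ_cons, List.map_map]
        exact List.map_congr_left fun x _ => by simp only [Function.comp_def]; omega

theorem pv_prefix_singleton (l : List Char) : ['_'] <+: l ↔ l[0]? = some '_' := by
  cases l with
  | nil => simp
  | cons x t => simp [List.cons_prefix_cons]; exact eq_comm

theorem find_eq_pvPos_head (cs : List Char) :
    PySem.Chars.find cs ['_'] =
      (((pvPos cs).head?).map (fun j : Nat => (j : Int))).getD (-1) := by
  by_cases hmem : '_' ∈ cs
  · have hpos : pvPos cs ≠ [] := fun h => (pvPos_nil_iff cs).mp h hmem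
    obtain ⟨j, hj⟩ : ∃ j, (pvPos cs).head? = some j := by
      cases h : (pvPos cs) with
      | nil => exact absurd h hpos
      | cons a t => exact ⟨a, by simp⟩
    obtain ⟨hj1, hj2⟩ := pvPos_head cs j hj
    have hfind : (0:Int) ≤ PySem.Chars.find cs ['_'] := by
      rw [PySem.Chars.find_nonneg_iff]
      exact (List.singleton_infix_iff _ _).mpr hmem
    obtain ⟨hpre, hmin⟩ := PySem.Chars.find_spec hfind
    set t := (PySem.Chars.find cs ['_']).toNat with ht
    have hct : cs[t]? = some '_' := by
      have := (pv_prefix_singleton _).mp hpre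
      simpa [List.getElem?_drop] using this
    have htj : t = j := by
      rcases lt_trichotomy t j with h | h | h
      · exact absurd hct (hj2 t h)
      · exact h
      · exact absurd ((pv_prefix_singleton _).mpr (by simpa [List.getElem?_drop] using hj1)) (hmin j h)
    rw [hj]
    simp only [Option.map_some, Option.getD_some]
    omega
  · have : pvPos cs = [] := (pvPos_nil_iff cs).mpr hmem
    rw [this]
    simp only [List.head?_nil, Option.map_none, Option.getD_none]
    rw [PySem.Chars.find_eq_neg_one_iff]
    rw [List.singleton_infix_iff]
    exact hmem

theorem findFrom_bridge (cs : List Char) (k : Nat) (hk : k ≤ cs.length) :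
    PySem.Chars.findFrom cs ['_'] (k : Int) none
      = ((((pvPos cs).map (fun j : Nat => (0 : Int) + (j : Int))).dropWhile (fun u => u < (k : Int))).head?).getD (-1) := by
  rw [PySem.Chars.findFrom_natCast cs ['_'] k hk, find_eq_pvPos_head]
  rw [List.dropWhile_map,
    show ((fun u : Int => decide (u < (k:Int))) ∘ fun j : Nat => (0:Int) + (j:Int))
        = (fun j : Nat => decide (j < k)) from
      funext fun j => by simp only [Function.comp_def, decide_eq_decide]; omega]
  rw [pvPos_drop, List.map_map]
  cases h : (pvPos (cs.drop k)).head? with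
  | none => simp [h, List.head?_map]
  | some j =>
    simp only [h, List.head?_map, Option.map_some, Option.getD_some, Function.comp_def]
    rw [if_neg (by omega)]
    push_cast; ring

theorem dropWhile_lt_twice (l : List Int) (a b : Int) (hab : a ≤ b) :
    (l.dropWhile (fun u => u < a)).dropWhile (fun u => u < b) = l.dropWhile (fun u => u < b) := by
  induction l with
  | nil => simp
  | cons x t ih =>
    by_cases hx : x < a
    · have hxb : x < b := lt_of_lt_of_le hx hab
      simp [hx, hxb, ih]
    · simp [List.dropWhile_cons, hx]

theorem pvTwoPtrB_nil (starts : List Int) : pvTwoPtrB starts [] = [] := by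
  cases starts <;> simp [pvTwoPtrB]

theorem main_cuts (cs : List Char) (ks : List Nat) (c : Nat) (acc : List Int)
    (hle : ∀ k ∈ ks, k ≤ cs.length ∧ c ≤ k) (hmono : ks.Pairwise (· ≤ ·)) :
    ks.foldl (fun (acc : List Int) (k : Nat) =>
        if PySem.Chars.findFrom cs ['_'] (k : Int) none = -1 then acc
        else acc ++ [PySem.Chars.findFrom cs ['_'] (k : Int) none]) acc
      = acc ++ pvTwoPtrB (ks.map (fun k : Nat => (k : Int)))
          (((pvPos cs).map (fun j : Nat => (0 : Int) + (j : Int))).dropWhile (fun u => u < (c : Int))) := by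
  induction ks generalizing c acc with
  | nil => simp [pvTwoPtrB]
  | cons k rest ih =>
    obtain ⟨hk, hck⟩ := hle k List.mem_cons_self
    have hrest : ∀ k' ∈ rest, k' ≤ cs.length ∧ k ≤ k' :=
      fun k' h => ⟨(hle k' (List.mem_cons_of_mem _ h)).1, (List.pairwise_cons.mp hmono).1 k' h⟩
    have hmono' := (List.pairwise_cons.mp hmono).2
    simp only [List.foldl_cons, List.map_cons]
    set U : List Int := (pvPos cs).map (fun j : Nat => (0 : Int) + (j : Int)) with hUdef
    have hUU : ((U.dropWhile (fun u => u < (c:Int))).dropWhile (fun u => u < (k:Int)))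
        = U.dropWhile (fun u => u < (k:Int)) :=
      dropWhile_lt_twice _ _ _ (by exact_mod_cast hck)
    rw [findFrom_bridge cs k hk, ← hUdef]
    cases hU : U.dropWhile (fun u => u < (k:Int)) with
    | nil =>
      simp only [List.head?_nil, Option.getD_none, if_true]
      rw [ih k acc hrest hmono']
      show acc ++ pvTwoPtrB _ (U.dropWhile (fun u => u < (k:Int)))
        = acc ++ pvTwoPtrB ((k:Int) :: rest.map (fun k : Nat => (k:Int))) (U.dropWhile (fun u => u < (c:Int)))
      rw [hU, pvTwoPtrB_nil, pvTwoPtrB, hUU, hU]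
    | cons u t =>
      have hu0 : (0:Int) ≤ u := by
        have hmem : u ∈ U := (List.dropWhile_suffix _).subset (hU ▸ List.mem_cons_self)
        obtain ⟨j, _, rfl⟩ := List.mem_map.mp hmem
        omega
      simp only [List.head?_cons, Option.getD_some]
      rw [if_neg (by omega)]
      rw [ih k (acc ++ [u]) hrest hmono']
      show (acc ++ [u]) ++ pvTwoPtrB _ (U.dropWhile (fun u => u < (k:Int)))
        = acc ++ pvTwoPtrB ((k:Int) :: rest.map (fun k : Nat => (k:Int))) (U.dropWhile (fun u => u < (c:Int)))
      rw [pvTwoPtrB, hUU, hU]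
      simp


-- s[-1] on a nonempty list is its last element
theorem pyGetD_neg_one (l : List Int) (h : l ≠ []) :
    PySem.List.pyGetD l (-1) 0 = l.getLast h := by
  have hlen : 0 < l.length := List.length_pos_iff.mpr h
  simp only [PySem.List.pyGetD, PySem.List.pyGet?, PySem.List.pyIdx?]
  rw [if_neg (by omega), if_pos (by omega)]
  rw [List.getLast_eq_getElem]
  simp [List.getElem?_eq_getElem (show l.length - 1 < l.length from by omega)]

-- slice from 0 = slice from the beginning
theorem slice_zero (cs : List Char) (b : Option Int) :
    PySem.List.slice cs (some 0) b = PySem.List.slice cs none b := by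
  simp [PySem.List.slice, PySem.List.clampIdx]

-- slice up to the length = slice to the end
theorem slice_len (cs : List Char) (a : Option Int) :
    PySem.List.slice cs a (some (cs.length : Int)) = PySem.List.slice cs a none := by
  have h : PySem.List.clampIdx cs.length (cs.length : Int) = cs.length := by
    simp [PySem.List.clampIdx]
  simp only [PySem.List.slice, h]

-- join with a separator, cons form
theorem join_cons_eq (sep p : List Char) (l : List (List Char)) :
    PySem.Chars.join sep (p :: l) = p ++ (l.map (fun q => sep ++ q)).flatten := by
  induction l generalizing p with
  | nil => simp [PySem.Chars.join_singleton]
  | cons q t ih => rw [PySem.Chars.join_cons_cons, ih q]; simp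


-- A's building loop, in closed form over consecutive index pairs
theorem foldA_eq (cs : List Char) (idx : List Int) (m : Nat) (hm : 1 ≤ m) (hml : m ≤ idx.length) :
    (List.range m).foldl (fun (ns : List Char) (i : Nat) =>
        if i = 0 then PySem.List.slice cs (some 0) (some (idx.getD 0 0))
        else ns ++ "<br>".toList ++ PySem.List.slice cs (some (idx.getD (i-1) 0)) (some (idx.getD i 0))) []
      = PySem.List.slice cs (some 0) (some (idx.getD 0 0)) ++
        ((List.range (m-1)).map (fun j =>
          "<br>".toList ++ PySem.List.slice cs (some (idx.getD j 0)) (some (idx.getD (j+1) 0)))).flatten := by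
  induction m with
  | zero => omega
  | succ m ih =>
    rcases Nat.eq_zero_or_pos m with hm0 | hm0
    · subst hm0
      simp
    · rw [List.range_succ, List.foldl_append, List.foldl_cons, List.foldl_nil,
        if_neg (by omega), ih hm0 (by omega)]
      rw [show m + 1 - 1 = (m - 1) + 1 from by omega, List.range_succ]
      simp only [List.map_append, List.flatten_append, List.map_cons, List.map_nil,
        List.flatten_cons, List.flatten_nil, List.append_nil,
        show m - 1 + 1 = m from by omega]
      simp [List.append_assoc]

-- the range-indexed pair list IS the zip with the tail
theorem range_map_eq_zip (cs : List Char) (idx : List Int) :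
    (List.range (idx.length - 1)).map (fun j =>
        "<br>".toList ++ PySem.List.slice cs (some (idx.getD j 0)) (some (idx.getD (j+1) 0)))
      = (idx.zip idx.tail).map (fun p =>
        "<br>".toList ++ PySem.List.slice cs (some p.1) (some p.2)) := by
  apply List.ext_getElem
  · simp [List.length_zip, List.length_tail]
  · intro j h1 h2
    simp only [List.getElem_map, List.getElem_range, List.getElem_zip]
    have hj : j < idx.length - 1 := by simpa using h1
    have h3 : j < idx.length := by omega
    have h4 : j + 1 < idx.length := by omega
    rw [List.getD_eq_getElem _ _ h3, List.getD_eq_getElem _ _ h4, List.getElem_tail]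

-- zipping with the tail plus a sentinel appends the (last, sentinel) pair
theorem zip_tail_append (l : List Int) (h : l ≠ []) (x : Int) :
    l.zip (l.tail ++ [x]) = l.zip l.tail ++ [(l.getLast h, x)] := by
  have hlen : l.dropLast.length = l.tail.length := by
    simp [List.length_dropLast, List.length_tail]
  rw [show l.zip (l.tail ++ [x]) = (l.dropLast ++ [l.getLast h]).zip (l.tail ++ [x]) from by
        rw [List.dropLast_append_getLast h],
      List.zip_append hlen]
  rw [show l.zip l.tail = (l.dropLast ++ [l.getLast h]).zip (l.tail ++ ([] : List Int)) from by
        rw [List.dropLast_append_getLast h]; simp,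
      List.zip_append hlen]
  simp

-- the cut list both programs compute
def pvKs (n : Nat) : List Nat := (List.range (n/10)).map (fun i => 10*(i+1))

theorem hU_nonneg (cs : List Char) (u : Int)
    (hu : u ∈ (pvPos cs).map (fun j : Nat => (0 : Int) + (j : Int))) : 0 ≤ u := by
  obtain ⟨j, _, rfl⟩ := List.mem_map.mp hu
  omega

theorem idx_eq_cuts (cs : List Char) (h10 : 10 < cs.length) :
    (List.range (cs.length/10)).foldl (fun (acc : List Int) (i : Nat) =>
        if PySem.Chars.findFrom cs ['_'] (10*((i : Int)+1)) none = -1 then acc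
        else acc ++ [PySem.Chars.findFrom cs ['_'] (10*((i : Int)+1)) none]) []
      = pvTwoPtrB (PySem.List.pyRange 10 (10*((cs.length/10 : Nat) : Int)+1) 10)
          ((PySem.List.enumerate cs 0).filterMap (fun p => if p.2 = '_' then some p.1 else none)) := by
  have hN1 : 1 ≤ cs.length / 10 := by omega
  have h1 : (List.range (cs.length/10)).foldl (fun (acc : List Int) (i : Nat) =>
        if PySem.Chars.findFrom cs ['_'] (10*((i : Int)+1)) none = -1 then acc
        else acc ++ [PySem.Chars.findFrom cs ['_'] (10*((i : Int)+1)) none]) []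
      = (pvKs cs.length).foldl (fun (acc : List Int) (k : Nat) =>
        if PySem.Chars.findFrom cs ['_'] (k : Int) none = -1 then acc
        else acc ++ [PySem.Chars.findFrom cs ['_'] (k : Int) none]) [] := by
    rw [pvKs, List.foldl_map]
    congr 1
  have h2 : PySem.List.pyRange 10 (10*((cs.length/10 : Nat) : Int)+1) 10
      = (pvKs cs.length).map (fun k : Nat => (k : Int)) := by
    rw [PySem.List.pyRange_of_pos _ _ (by norm_num)]
    rw [if_pos (by omega)]
    rw [show (10*((cs.length/10 : Nat) : Int)+1 - 10 + 10 - 1) = 10*((cs.length/10 : Nat) : Int) from by ring]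
    rw [Int.mul_ediv_cancel_left _ (by norm_num), Int.toNat_natCast]
    rw [pvKs, List.map_map]
    exact List.map_congr_left fun i _ => by simp [Function.comp]; ring
  have h3 := main_cuts cs (pvKs cs.length) 0 []
    (by
      intro k hk
      rw [pvKs] at hk
      obtain ⟨i, hi, rfl⟩ := List.mem_map.mp hk
      have hi' : i < cs.length / 10 := List.mem_range.mp hi
      constructor
      · have := Nat.div_mul_le_self cs.length 10
        omega
      · omega)
    (by
      rw [pvKs]
      exact List.Pairwise.map _ (fun a b hab => by omega) List.pairwise_lt_range)
  have h4 : ((pvPos cs).map (fun j : Nat => (0 : Int) + (j : Int))).dropWhile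
      (fun u => u < ((0 : Nat) : Int)) = (pvPos cs).map (fun j : Nat => (0 : Int) + (j : Int)) := by
    cases hU : (pvPos cs).map (fun j : Nat => (0 : Int) + (j : Int)) with
    | nil => rfl
    | cons a t =>
      rw [List.dropWhile_cons, if_neg]
      have ha : 0 ≤ a := hU_nonneg cs a (hU ▸ List.mem_cons_self)
      simp only [decide_eq_true_eq]
      omega
  rw [h1, h2, pvUnds_eq cs 0, h3, h4]
  simp

-- ===== VERDICT (by name: the statement is the Claim_ definition above) =====
theorem newline_name_spec : Claim_equal_newline_name := by
  intro s _
  show newline_name s = newline_name_alt s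
  simp only [newline_name, newline_name_alt]
  by_cases h10 : 10 < s.toList.length
  · rw [if_pos h10, if_neg (show ¬ s.toList.length ≤ 10 from by omega)]
    rw [idx_eq_cuts s.toList h10]
    cases hI : pvTwoPtrB (PySem.List.pyRange 10 (10*((s.toList.length/10 : Nat) : Int)+1) 10)
        ((PySem.List.enumerate s.toList 0).filterMap (fun p => if p.2 = '_' then some p.1 else none)) with
    | nil => simp
    | cons c0 cr =>
      rw [if_pos (by simp)]
      rw [foldA_eq s.toList (c0 :: cr) (c0 :: cr).length (by simp) le_rfl]
      rw [range_map_eq_zip]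
      rw [pyGetD_neg_one (c0 :: cr) (by simp)]
      show _ = String.ofList (PySem.Chars.join "<br>".toList
        (PySem.List.slice s.toList none (some c0) ::
          ((c0 :: cr).zip ((c0 :: cr).tail ++ [(s.toList.length : Int)])).map
            (fun p => PySem.List.slice s.toList (some p.1) (some p.2))))
      rw [join_cons_eq]
      rw [zip_tail_append (c0 :: cr) (by simp) ((s.toList.length : Int))]
      simp only [List.map_append, List.map_map, List.map_cons, List.map_nil,
        List.flatten_append, List.flatten_cons, List.flatten_nil, List.append_nil,
        Function.comp_def]
      rw [slice_zero]
      rw [show (c0 :: cr).getD 0 0 = c0 from by simp]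
      rw [slice_len]
      simp only [List.append_assoc]
  · rw [if_neg h10, if_pos (by omega)]
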